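-- pv_equiv track=rewrite | github.com/ahyangyi/agrf | agrf/lib/building/station_tile_switch.py | _find_default_element
-- ===== SOURCE A (Python) =====
-- def _find_default_element(d):
--     reverse_lookup = {}
--     value_count = {}
--
--     prev_k = prev_v = None
--     for k, v in sorted(d.items()):
--         if isinstance(v, int):
--             key = v
--         else:
--             key = id(v)
--             reverse_lookup[key] = v
--
--         if prev_k is None or k != prev_k + 1 or v != prev_v:
--             value_count[key] = value_count.get(key, 0) + 1
--
--         prev_k = k
--         prev_v = v
--
--     max_count = max(value_count.values())
--     return [reverse_lookup.get(v, v) for v, c in value_count.items() if c == max_count][0]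
-- ===== SOURCE B (Python) =====
-- def _find_default_element(d):
--     count = {}
--     first = {}
--     for k, v in d.items():
--         # (k, v) starts a run exactly when the key k-1 is absent or maps elsewhere
--         if d.get(k - 1) != v:
--             count[v] = count.get(v, 0) + 1
--             if v not in first or k < first[v]:
--                 first[v] = k
--     best = None
--     for v, c in count.items():
--         if best is None or c > count[best] or (c == count[best] and first[v] < first[best]):
--             best = v
--     return best
-- ===== Notes on version B (the rewrite author's own statement) =====
-- stated objective: faster
-- what changed: Instead of sorting the items and comparing each key/value with the previous one, B makes a single hash pass over the dict, detecting a run start by looking up d.get(k-1), and tracks per value its run count and minimal run-start key, then selects the value with the most runs breaking ties by smallest first-start key.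
import Mathlib
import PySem

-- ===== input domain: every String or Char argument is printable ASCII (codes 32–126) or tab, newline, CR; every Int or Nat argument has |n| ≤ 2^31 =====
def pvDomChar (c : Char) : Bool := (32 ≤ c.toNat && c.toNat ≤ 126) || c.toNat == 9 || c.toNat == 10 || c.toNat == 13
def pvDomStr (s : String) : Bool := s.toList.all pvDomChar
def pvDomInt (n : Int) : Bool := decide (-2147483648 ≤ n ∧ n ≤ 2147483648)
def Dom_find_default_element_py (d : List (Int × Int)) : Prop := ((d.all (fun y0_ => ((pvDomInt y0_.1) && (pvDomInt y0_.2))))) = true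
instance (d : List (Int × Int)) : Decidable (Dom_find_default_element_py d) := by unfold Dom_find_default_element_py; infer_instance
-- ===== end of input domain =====

-- B replaces A's sort-and-scan run counting by a single hash pass (d.get(k-1) detects run
-- starts; per-value run count and minimal first-start key, max count with min-first tie-break).


-- ===== PORT A =====
-- for dict[int,int] every value satisfies isinstance(v, int), so key = v and
-- reverse_lookup stays empty (reverse_lookup.get(v, v) = v); ported accordingly
def find_default_element_py (d : List (Int × Int)) : Int :=
  let pairs := PySem.List.sorted2 d Prod.fst Prod.snd false
  let st := pairs.foldl
    (fun (st : Option (Int × Int) × PySem.Dict Int Int) kv =>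
      let vc :=
        match st.1 with
        | none => st.2.insert kv.2 (st.2.getD kv.2 0 + 1)
        | some (pk, pv) =>
            if kv.1 ≠ pk + 1 ∨ kv.2 ≠ pv then st.2.insert kv.2 (st.2.getD kv.2 0 + 1) else st.2
      (some kv, vc))
    (none, PySem.Dict.empty)
  let value_count := st.2
  let max_count := (PySem.List.max? value_count.values (fun c => c)).getD 0
  (((value_count.items.filter (fun p => p.2 == max_count)).map Prod.fst).headD 0)

-- ===== PORT B =====
def find_default_element_py_alt (d : List (Int × Int)) : Int :=
  let dd := PySem.Dict.mk d
  let st := d.foldl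
    (fun (st : PySem.Dict Int Int × PySem.Dict Int Int) kv =>
      if dd.get? (kv.1 - 1) ≠ some kv.2 then
        let count := st.1.insert kv.2 (st.1.getD kv.2 0 + 1)
        let first := if st.2.contains kv.2 = false ∨ kv.1 < st.2.getD kv.2 0 then st.2.insert kv.2 kv.1 else st.2
        (count, first)
      else st)
    (PySem.Dict.empty, PySem.Dict.empty)
  let count := st.1
  let first := st.2
  (count.items.foldl
    (fun (best : Option Int) p =>
      match best with
      | none => some p.1
      | some b =>
          if p.2 > count.getD b 0 ∨ (p.2 = count.getD b 0 ∧ first.getD p.1 0 < first.getD b 0) then some p.1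
          else best)
    none).getD 0

-- ===== PRECONDITION & SPEC =====
-- Pre_ excludes the empty dict, on which A's max(value_count.values()) raises ValueError, and
-- association lists with duplicate first components, which do not represent any dict[int,int].
def Pre_find_default_element_py (d : List (Int × Int)) : Prop :=
  d ≠ [] ∧ (d.map Prod.fst).Nodup
instance (d : List (Int × Int)) : Decidable (Pre_find_default_element_py d) := by
  unfold Pre_find_default_element_py; infer_instance

def pvWitness_find_default_element_py : (List (Int × Int)) := ([(0, 5), (1, 5), (3, 2)])

def Spec_find_default_element_py (d : List (Int × Int)) (out : Int) : Prop := out = find_default_element_py_alt d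
instance (d : List (Int × Int)) (out : Int) : Decidable (Spec_find_default_element_py d out) := by unfold Spec_find_default_element_py; infer_instance

-- ===== CLAIM (what is proved, stated in full; the proofs are below) =====
def Claim_equal_find_default_element_py : Prop := ∀ (d : List (Int × Int)), Dom_find_default_element_py d → Pre_find_default_element_py d → Spec_find_default_element_py d (find_default_element_py d)

-- ===== LEMMAS AND PROOFS =====
-- ===== PORT A =====
def pvLk (d : List (Int × Int)) (x : Int) : Option Int := (PySem.Dict.mk d).get? x
def pvSt (d : List (Int × Int)) (p : Int × Int) : Bool := decide (pvLk d (p.1 - 1) ≠ some p.2)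
def pvS (d : List (Int × Int)) : List (Int × Int) := PySem.List.sorted d Prod.fst false
def pvStarts (d : List (Int × Int)) : List (Int × Int) := (pvS d).filter (pvSt d)
def pvStartsB (d : List (Int × Int)) : List (Int × Int) := d.filter (pvSt d)

def pvMinKey : List (Int × Int) → Int → Option Int
  | [], _ => none
  | p :: l, v =>
    if p.2 = v then some (match pvMinKey l v with | none => p.1 | some m => min p.1 m)
    else pvMinKey l v

def pvOmin : Option Int → Option Int → Option Int
  | none, b => b
  | some a, none => some a
  | some a, some b => some (min a b)

lemma pvOmin_none_right (a : Option Int) : pvOmin a none = a := by cases a <;> rfl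

lemma pvOmin_assoc (a b c : Option Int) : pvOmin (pvOmin a b) c = pvOmin a (pvOmin b c) := by
  cases a <;> cases b <;> cases c <;> simp [pvOmin, min_assoc]

lemma pvMinKey_cons (p : Int × Int) (l : List (Int × Int)) (v : Int) :
    pvMinKey (p :: l) v = pvOmin (if p.2 = v then some p.1 else none) (pvMinKey l v) := by
  by_cases h : p.2 = v <;> simp [pvMinKey, h] <;> cases hm : pvMinKey l v <;> simp [pvOmin]

lemma pvMinKey_eq_none_iff (l : List (Int × Int)) (v : Int) :
    pvMinKey l v = none ↔ ∀ p ∈ l, p.2 ≠ v := by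
  induction l with
  | nil => simp [pvMinKey]
  | cons p l ih =>
    by_cases h : p.2 = v
    · simp [pvMinKey, h]
    · simp [pvMinKey, h, ih]

lemma pvMinKey_mem {l : List (Int × Int)} {v m : Int} (h : pvMinKey l v = some m) :
    (m, v) ∈ l := by
  induction l generalizing m with
  | nil => simp [pvMinKey] at h
  | cons p l ih =>
    rw [pvMinKey_cons] at h
    by_cases hp : p.2 = v
    · have hpv : (p.1, v) = p := by rw [← hp]
      cases hm : pvMinKey l v with
      | none => simp [hm, hp, pvOmin] at h; rw [← h, hpv]; exact List.mem_cons_self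
      | some m' =>
        simp [hm, hp, pvOmin] at h
        rcases min_cases p.1 m' with ⟨he, _⟩ | ⟨he, _⟩
        · rw [he] at h; rw [← h, hpv]; exact List.mem_cons_self
        · rw [he] at h; rw [← h]; exact List.mem_cons_of_mem _ (ih hm)
    · simp [hp, pvOmin] at h
      exact List.mem_cons_of_mem _ (ih h)

lemma pvMinKey_le {l : List (Int × Int)} {v m : Int} (h : pvMinKey l v = some m) :
    ∀ p ∈ l, p.2 = v → m ≤ p.1 := by
  induction l generalizing m with
  | nil => simp
  | cons p l ih =>
    rw [pvMinKey_cons] at h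
    intro q hq hqv
    by_cases hp : p.2 = v
    · cases hm : pvMinKey l v with
      | none =>
        simp [hm, hp, pvOmin] at h
        rcases List.mem_cons.mp hq with rfl | hq
        · omega
        · exact absurd hqv ((pvMinKey_eq_none_iff l v).1 hm q hq)
      | some m' =>
        simp [hm, hp, pvOmin] at h
        rcases List.mem_cons.mp hq with rfl | hq
        · rw [← h]; exact min_le_left _ _
        · rw [← h]; exact le_trans (min_le_right _ _) (ih hm q hq hqv)
    · simp [hp, pvOmin] at h
      rcases List.mem_cons.mp hq with rfl | hq
      · exact absurd hqv hp
      · exact ih h q hq hqv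

lemma pvMinKey_isSome {l : List (Int × Int)} {v : Int} (h : ∃ p ∈ l, p.2 = v) :
    ∃ m, pvMinKey l v = some m := by
  cases hm : pvMinKey l v with
  | none =>
    rcases h with ⟨p, hp, hv⟩
    exact absurd hv ((pvMinKey_eq_none_iff l v).1 hm p hp)
  | some m => exact ⟨m, rfl⟩

lemma pvMinKey_perm {l l' : List (Int × Int)} (h : l.Perm l') (v : Int) :
    pvMinKey l v = pvMinKey l' v := by
  cases hm : pvMinKey l v with
  | none =>
    cases hm' : pvMinKey l' v with
    | none => rfl
    | some m' =>
      have := pvMinKey_mem hm'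
      have : (m', v) ∈ l := h.symm.subset this
      exact absurd rfl ((pvMinKey_eq_none_iff l v).1 hm _ this)
  | some m =>
    cases hm' : pvMinKey l' v with
    | none =>
      have := pvMinKey_mem hm
      have : (m, v) ∈ l' := h.subset this
      exact absurd rfl ((pvMinKey_eq_none_iff l' v).1 hm' _ this)
    | some m' =>
      have h1 : m ≤ m' := pvMinKey_le hm _ (h.symm.subset (pvMinKey_mem hm')) rfl
      have h2 : m' ≤ m := pvMinKey_le hm' _ (h.subset (pvMinKey_mem hm)) rfl
      exact congrArg some (le_antisymm h1 h2)

lemma pvInsertBy_congr {α : Type} (f g : α → α → Bool) (x : α) (ys : List α)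
    (h : ∀ b ∈ ys, f x b = g x b) : PySem.List.insertBy f x ys = PySem.List.insertBy g x ys := by
  induction ys with
  | nil => rfl
  | cons y ys ih =>
    simp only [PySem.List.insertBy]
    rw [h y List.mem_cons_self]
    by_cases hg : g x y = true
    · simp [hg]
    · simp only [Bool.not_eq_true] at hg
      simp [hg]
      exact ih (fun b hb => h b (List.mem_cons_of_mem _ hb))

lemma pvFoldl_insertBy_congr {α : Type} (f g : α → α → Bool) (l acc : List α)
    (h : ∀ a b, (a ∈ l ∨ a ∈ acc) → (b ∈ l ∨ b ∈ acc) → f a b = g a b) :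
    l.foldl (fun acc x => PySem.List.insertBy f x acc) acc
      = l.foldl (fun acc x => PySem.List.insertBy g x acc) acc := by
  induction l generalizing acc with
  | nil => rfl
  | cons x l ih =>
    simp only [List.foldl_cons]
    rw [pvInsertBy_congr f g x acc
      (fun b hb => h x b (Or.inl List.mem_cons_self) (Or.inr hb))]
    apply ih
    intro a b ha hb
    apply h a b
    · rcases ha with ha | ha
      · exact Or.inl (List.mem_cons_of_mem _ ha)
      · rcases (PySem.List.mem_insertBy g x a acc).1 ha with rfl | ha
        · exact Or.inl List.mem_cons_self
        · exact Or.inr ha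
    · rcases hb with hb | hb
      · exact Or.inl (List.mem_cons_of_mem _ hb)
      · rcases (PySem.List.mem_insertBy g x b acc).1 hb with rfl | hb
        · exact Or.inl List.mem_cons_self
        · exact Or.inr hb

lemma pvKeyInj {d : List (Int × Int)} (hnd : (d.map Prod.fst).Nodup)
    {a b : Int × Int} (ha : a ∈ d) (hb : b ∈ d) (hfst : a.1 = b.1) : a = b := by
  have := List.inj_on_of_nodup_map hnd ha hb hfst
  exact this

lemma pvSorted2_eq (d : List (Int × Int)) (hnd : (d.map Prod.fst).Nodup) :
    PySem.List.sorted2 d Prod.fst Prod.snd false = pvS d := by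
  unfold PySem.List.sorted2 pvS PySem.List.sorted
  simp only [if_neg (by decide : ¬ (false = true))]
  apply pvFoldl_insertBy_congr
  intro a b ha hb
  simp only [List.not_mem_nil, or_false] at ha hb
  by_cases hab : a.1 = b.1
  · have : a = b := pvKeyInj hnd ha hb hab
    subst this
    simp
  · by_cases hl : a.1 < b.1
    · simp [hl]
    · have : b.1 < a.1 := by omega
      simp [hl, this]

lemma pvS_perm (d : List (Int × Int)) : (pvS d).Perm d := PySem.List.sorted_perm d Prod.fst false

lemma pvMem_pvS {d : List (Int × Int)} {p : Int × Int} : p ∈ pvS d ↔ p ∈ d :=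
  PySem.List.mem_sorted d Prod.fst false p

lemma pvS_pairwise {d : List (Int × Int)} (hnd : (d.map Prod.fst).Nodup) :
    (pvS d).Pairwise (fun a b => a.1 < b.1) := by
  have h1 : (pvS d).Pairwise (fun a b => a.1 ≤ b.1) := PySem.List.sorted_pairwise d Prod.fst
  have h2 : ((pvS d).map Prod.fst).Nodup := ((pvS_perm d).map Prod.fst).nodup_iff.2 hnd
  have h3 : (pvS d).Pairwise (fun a b => a.1 ≠ b.1) := List.pairwise_map.1 h2
  exact (h1.and h3).imp (fun h => lt_of_le_of_ne h.1 h.2)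

lemma pvLk_iff {d : List (Int × Int)} (hnd : (d.map Prod.fst).Nodup) (x w : Int) :
    pvLk d x = some w ↔ (x, w) ∈ d := by
  unfold pvLk
  have hk : (PySem.Dict.mk d).keys.Nodup := by
    simpa [PySem.Dict.keys] using hnd
  exact PySem.Dict.get?_eq_some_iff_mem_items _ x w hk

lemma pvHead_start {d : List (Int × Int)} (hnd : (d.map Prod.fst).Nodup)
    {s0 : Int × Int} {rest : List (Int × Int)} (hS : pvS d = s0 :: rest) :
    pvSt d s0 = true := by
  have hpw := pvS_pairwise hnd
  rw [hS] at hpw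
  unfold pvSt
  rw [decide_eq_true_iff]
  intro hlk
  have hmem : (s0.1 - 1, s0.2) ∈ d := (pvLk_iff hnd _ _).1 hlk
  have : (s0.1 - 1, s0.2) ∈ pvS d := pvMem_pvS.2 hmem
  rw [hS] at this
  rcases List.mem_cons.mp this with heq | hmem'
  · have : s0.1 - 1 = s0.1 := congrArg Prod.fst heq
    omega
  · have := (List.pairwise_cons.1 hpw).1 _ hmem'
    simp at this
    omega

lemma pvStep_cond {d : List (Int × Int)} (hnd : (d.map Prod.fst).Nodup)
    {pre L : List (Int × Int)} {q p : Int × Int}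
    (hS : pvS d = pre ++ q :: p :: L) :
    (¬ (p.1 ≠ q.1 + 1 ∨ p.2 ≠ q.2)) ↔ pvLk d (p.1 - 1) = some p.2 := by
  have hpw := pvS_pairwise hnd
  rw [hS] at hpw
  constructor
  · intro h
    push Not at h
    have hq : q ∈ d := pvMem_pvS.1 (by rw [hS]; exact List.mem_append_right _ List.mem_cons_self)
    have : pvLk d q.1 = some q.2 := (pvLk_iff hnd _ _).2 hq
    rw [h.1, h.2]
    simpa using this
  · intro hlk
    push Not
    have hmem : (p.1 - 1, p.2) ∈ d := (pvLk_iff hnd _ _).1 hlk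
    have hmemS : (p.1 - 1, p.2) ∈ pvS d := pvMem_pvS.2 hmem
    rw [hS] at hmemS
    -- pairwise facts
    have hqp : q.1 < p.1 := by
      have h3 : (q :: p :: L).Pairwise (fun a b => a.1 < b.1) := (List.pairwise_append.1 hpw).2.1
      exact (List.pairwise_cons.1 h3).1 p List.mem_cons_self
    rcases List.mem_append.1 hmemS with hpre | hrest
    · -- element of pre has key < q.1, but its key is p.1 - 1 ≥ q.1
      have hcross := (List.pairwise_append.1 hpw).2.2
      have : (p.1 - 1 : Int) < q.1 := by
        have := hcross _ hpre q (List.mem_cons_self)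
        simpa using this
      omega
    · rcases List.mem_cons.mp hrest with heq | hrest2
      · have h1 : p.1 - 1 = q.1 := congrArg Prod.fst heq
        have h2 : p.2 = q.2 := (congrArg Prod.snd heq : ((p.1 - 1, p.2) : Int × Int).2 = q.2)
        exact ⟨by omega, h2⟩
      · rcases List.mem_cons.mp hrest2 with heq | hL
        · have : p.1 - 1 = p.1 := congrArg Prod.fst heq
          omega
        · -- element of L has key > p.1, contradiction with key = p.1 - 1
          have h3 : (q :: p :: L).Pairwise (fun a b => a.1 < b.1) := (List.pairwise_append.1 hpw).2.1
          have h4 := (List.pairwise_cons.1 (List.pairwise_cons.1 h3).2).1 _ hL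
          simp at h4
          omega

lemma pvAfold {d : List (Int × Int)} (hnd : (d.map Prod.fst).Nodup) :
    ∀ (L pre : List (Int × Int)) (q : Int × Int) (vc : PySem.Dict Int Int),
    pvS d = pre ++ q :: L →
    (L.foldl
      (fun (st : Option (Int × Int) × PySem.Dict Int Int) kv =>
        let vc :=
          match st.1 with
          | none => st.2.insert kv.2 (st.2.getD kv.2 0 + 1)
          | some (pk, pv) =>
              if kv.1 ≠ pk + 1 ∨ kv.2 ≠ pv then st.2.insert kv.2 (st.2.getD kv.2 0 + 1) else st.2
        (some kv, vc))
      (some q, vc)).2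
    = (L.filter (pvSt d)).foldl (fun c p => c.insert p.2 (c.getD p.2 0 + 1)) vc := by
  intro L
  induction L with
  | nil => intro pre q vc _; rfl
  | cons p L ih =>
    intro pre q vc hS
    have hcond := pvStep_cond hnd (pre := pre) (L := L) (q := q) (p := p) hS
    have hS' : pvS d = (pre ++ [q]) ++ p :: L := by simpa using hS
    have hst : pvSt d p = (decide (p.1 ≠ q.1 + 1 ∨ p.2 ≠ q.2)) := by
      unfold pvSt
      by_cases hc : p.1 ≠ q.1 + 1 ∨ p.2 ≠ q.2
      · simp only [hc, decide_true]
        rw [decide_eq_true_iff]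
        exact fun hlk => (hcond.2 hlk) hc
      · simp only [hc, decide_false]
        rw [decide_eq_false_iff_not, not_not]
        exact hcond.1 hc
    by_cases hc : p.1 ≠ q.1 + 1 ∨ p.2 ≠ q.2
    · have hstt : pvSt d p = true := by rw [hst]; simpa using hc
      simp only [List.foldl_cons, List.filter_cons, hstt, if_pos hc]
      exact ih (pre ++ [q]) p _ hS'
    · have hstf : pvSt d p = false := by rw [hst]; simpa using hc
      simp only [List.foldl_cons, List.filter_cons, hstf, if_neg hc]
      exact ih (pre ++ [q]) p _ hS'

lemma pvStarts_perm {d : List (Int × Int)} : (pvStarts d).Perm (pvStartsB d) :=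
  (pvS_perm d).filter (pvSt d)

lemma pvStarts_cons {d : List (Int × Int)} (hnd : (d.map Prod.fst).Nodup)
    {s0 : Int × Int} {rest : List (Int × Int)} (hS : pvS d = s0 :: rest) :
    pvStarts d = s0 :: rest.filter (pvSt d) := by
  unfold pvStarts
  rw [hS, List.filter_cons, if_pos (pvHead_start hnd hS)]

lemma pvA_vc {d : List (Int × Int)} (hnd : (d.map Prod.fst).Nodup)
    {s0 : Int × Int} {rest : List (Int × Int)} (hS : pvS d = s0 :: rest) :
    ((PySem.List.sorted2 d Prod.fst Prod.snd false).foldl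
      (fun (st : Option (Int × Int) × PySem.Dict Int Int) kv =>
        let vc :=
          match st.1 with
          | none => st.2.insert kv.2 (st.2.getD kv.2 0 + 1)
          | some (pk, pv) =>
              if kv.1 ≠ pk + 1 ∨ kv.2 ≠ pv then st.2.insert kv.2 (st.2.getD kv.2 0 + 1) else st.2
        (some kv, vc))
      (none, PySem.Dict.empty)).2
    = PySem.Dict.counter ((pvStarts d).map Prod.snd) := by
  rw [pvSorted2_eq d hnd, hS]
  simp only [List.foldl_cons]
  have h1 := pvAfold hnd rest [] s0
    (PySem.Dict.empty.insert s0.2 (PySem.Dict.empty.getD s0.2 0 + 1)) hS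
  rw [h1]
  have h2 : pvStarts d = s0 :: rest.filter (pvSt d) := pvStarts_cons hnd hS
  rw [h2]
  rw [← PySem.Dict.foldl_insert_getD_add_one_eq_counter]
  simp only [List.map_cons, List.foldl_cons, List.foldl_map]

lemma pvFirstStep_get? (a : PySem.Dict Int Int) (p : Int × Int) (v : Int) :
    ((if a.contains p.2 = false ∨ p.1 < a.getD p.2 0 then a.insert p.2 p.1 else a).get? v)
    = pvOmin (a.get? v) (if p.2 = v then some p.1 else none) := by
  by_cases hv : p.2 = v
  · subst hv
    cases hget : a.get? p.2 with
    | none =>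
      have hc : a.contains p.2 = false := by
        rw [PySem.Dict.contains_eq_isSome_get?, hget]; rfl
      rw [if_pos (Or.inl hc), PySem.Dict.get?_insert_self]
      simp [pvOmin]
    | some x =>
      have hc : a.contains p.2 = true := by
        rw [PySem.Dict.contains_eq_isSome_get?, hget]; rfl
      have hgd : a.getD p.2 0 = x := by
        rw [PySem.Dict.getD_eq_get?_getD, hget]; rfl
      by_cases hlt : p.1 < x
      · rw [if_pos (Or.inr (by rw [hgd]; exact hlt)), PySem.Dict.get?_insert_self]
        simp [pvOmin, min_eq_right (le_of_lt hlt)]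
      · rw [if_neg (by rw [hc, hgd]; simpa using hlt), hget]
        simp [pvOmin, min_eq_left (by omega : x ≤ p.1)]
  · by_cases hcond : a.contains p.2 = false ∨ p.1 < a.getD p.2 0
    · rw [if_pos hcond, PySem.Dict.get?_insert_of_ne a p.1 (fun h => hv h.symm)]
      simp [pvOmin_none_right, hv]
    · rw [if_neg hcond]
      simp [pvOmin_none_right, hv]

lemma pvFirstFold_get? (l : List (Int × Int)) (a : PySem.Dict Int Int) (v : Int) :
    ((l.foldl (fun fs kv =>
        if fs.contains kv.2 = false ∨ kv.1 < fs.getD kv.2 0 then fs.insert kv.2 kv.1 else fs) a).get? v)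
    = pvOmin (a.get? v) (pvMinKey l v) := by
  induction l generalizing a with
  | nil => simp [pvMinKey, pvOmin_none_right]
  | cons p l ih =>
    simp only [List.foldl_cons]
    rw [ih, pvFirstStep_get? a p v, pvOmin_assoc, pvMinKey_cons]

lemma pvMinKey_ne {p : Int × Int} {l : List (Int × Int)} {v : Int} (hv : p.2 ≠ v) :
    pvMinKey (p :: l) v = pvMinKey l v := by
  simp [pvMinKey, hv]

lemma pvMinKey_head {p : Int × Int} {r : List (Int × Int)}
    (hpw : (p :: r).Pairwise (fun a b => a.1 < b.1)) :
    pvMinKey (p :: r) p.2 = some p.1 := by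
  rw [pvMinKey_cons, if_pos rfl]
  cases hm : pvMinKey r p.2 with
  | none => rfl
  | some m =>
    have hmem := pvMinKey_mem hm
    have : p.1 < m := by
      have := (List.pairwise_cons.1 hpw).1 _ hmem
      simpa using this
    simp [pvOmin, min_eq_left (le_of_lt this)]

lemma pvPairwise_fm :
    ∀ (st : List (Int × Int)), st.Pairwise (fun a b => a.1 < b.1) →
    (PySem.Set.ofList (st.map Prod.snd)).Pairwise
      (fun a b => (pvMinKey st a).getD 0 < (pvMinKey st b).getD 0) := by
  intro st
  induction st with
  | nil => intro _; simp [PySem.Set.ofList]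
  | cons p r ih =>
    intro hpw
    have hr : r.Pairwise (fun a b => a.1 < b.1) := (List.pairwise_cons.1 hpw).2
    simp only [List.map_cons, PySem.Set.ofList_cons]
    rw [List.pairwise_cons]
    constructor
    · intro b hb
      rcases (PySem.Set.mem_discard _ _ _).1 hb with ⟨hbmem, hbne⟩
      have hbr : b ∈ r.map Prod.snd := (PySem.Set.mem_ofList _ _).1 hbmem
      rcases List.mem_map.1 hbr with ⟨q, hq, rfl⟩
      obtain ⟨mb, hmb⟩ := pvMinKey_isSome (l := r) (v := q.2) ⟨q, hq, rfl⟩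
      have hmbmem := pvMinKey_mem hmb
      have hlt : p.1 < mb := by
        have := (List.pairwise_cons.1 hpw).1 _ hmbmem
        simpa using this
      rw [pvMinKey_head hpw, pvMinKey_ne (fun h => hbne h.symm), hmb]
      simpa using hlt
    · have hpair := ih hr
      have hsub : ((PySem.Set.ofList (r.map Prod.snd)).discard p.2).Sublist
          (PySem.Set.ofList (r.map Prod.snd)) := List.filter_sublist
      refine List.Pairwise.imp_of_mem ?_ (hpair.sublist hsub)
      intro a b ha hb hab
      have hane : a ≠ p.2 := ((PySem.Set.mem_discard _ _ _).1 ha).2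
      have hbne : b ≠ p.2 := ((PySem.Set.mem_discard _ _ _).1 hb).2
      rw [pvMinKey_ne (fun h => hane h.symm), pvMinKey_ne (fun h => hbne h.symm)]
      exact hab

def pvBeats (c f : Int → Int) (x y : Int) : Prop :=
  c y < c x ∨ (c y = c x ∧ f x < f y)

lemma pvBeats_trans {c f : Int → Int} {x y z : Int}
    (h1 : pvBeats c f x y) (h2 : pvBeats c f y z) : pvBeats c f x z := by
  unfold pvBeats at *
  rcases h1 with h1 | ⟨h1, h1'⟩ <;> rcases h2 with h2 | ⟨h2, h2'⟩
  · exact Or.inl (by omega)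
  · exact Or.inl (by omega)
  · exact Or.inl (by omega)
  · exact Or.inr ⟨by omega, by omega⟩

lemma pvSelFoldPure (c f : Int → Int) :
    ∀ (V : List Int) (b : Int), (b :: V).Nodup →
    (∀ x ∈ b :: V, ∀ y ∈ b :: V, x ≠ y → f x ≠ f y) →
    (V.foldl (fun best v => if c v > c best ∨ (c v = c best ∧ f v < f best) then v else best) b)
      ∈ b :: V ∧
    ∀ w ∈ b :: V, w ≠ (V.foldl (fun best v => if c v > c best ∨ (c v = c best ∧ f v < f best) then v else best) b) →
      pvBeats c f (V.foldl (fun best v => if c v > c best ∨ (c v = c best ∧ f v < f best) then v else best) b) w := by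
  intro V
  induction V with
  | nil =>
    intro b _ _
    refine ⟨List.mem_cons_self, ?_⟩
    intro w hw hne
    rcases List.mem_cons.mp hw with rfl | hw
    · exact absurd rfl hne
    · simp at hw
  | cons v V' ih =>
    intro b hnd hf
    have hbv : b ≠ v := by
      intro h; subst h
      exact (List.nodup_cons.1 hnd).1 List.mem_cons_self
    simp only [List.foldl_cons]
    set b' := if c v > c b ∨ (c v = c b ∧ f v < f b) then v else b with hb'
    -- b' and the dropped element
    have hstep : (b' = v ∧ pvBeats c f v b) ∨ (b' = b ∧ pvBeats c f b v) := by
      by_cases hc : c v > c b ∨ (c v = c b ∧ f v < f b)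
      · left
        refine ⟨by rw [hb', if_pos hc], ?_⟩
        unfold pvBeats
        rcases hc with hc | hc
        · exact Or.inl hc
        · exact Or.inr ⟨hc.1.symm ▸ rfl, hc.2⟩
      · right
        refine ⟨by rw [hb', if_neg hc], ?_⟩
        push Not at hc
        unfold pvBeats
        by_cases he : c v = c b
        · refine Or.inr ⟨he, ?_⟩
          have hfle := hc.2 he
          have hfne : f b ≠ f v := hf b List.mem_cons_self v
            (List.mem_cons_of_mem _ List.mem_cons_self) hbv
          omega
        · have := hc.1
          exact Or.inl (by omega)
    have hb'mem : b' ∈ b :: v :: V' := by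
      rcases hstep with ⟨heq, _⟩ | ⟨heq, _⟩
      · rw [heq]; exact List.mem_cons_of_mem _ List.mem_cons_self
      · rw [heq]; exact List.mem_cons_self
    have hsub : ∀ x ∈ b' :: V', x ∈ b :: v :: V' := by
      intro x hx
      rcases List.mem_cons.mp hx with rfl | hx
      · exact hb'mem
      · exact List.mem_cons_of_mem _ (List.mem_cons_of_mem _ hx)
    have hnd' : (b' :: V').Nodup := by
      rw [List.nodup_cons]
      refine ⟨?_, ((List.nodup_cons.1 (List.nodup_cons.1 hnd).2).2)⟩
      rcases hstep with ⟨heq, _⟩ | ⟨heq, _⟩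
      · rw [heq]; exact (List.nodup_cons.1 (List.nodup_cons.1 hnd).2).1
      · rw [heq]; intro h
        exact (List.nodup_cons.1 hnd).1 (List.mem_cons_of_mem _ h)
    have hf' : ∀ x ∈ b' :: V', ∀ y ∈ b' :: V', x ≠ y → f x ≠ f y :=
      fun x hx y hy => hf x (hsub x hx) y (hsub y hy)
    obtain ⟨hmem, hbeats⟩ := ih b' hnd' hf'
    refine ⟨hsub _ hmem, ?_⟩
    intro w hw hne
    set r := V'.foldl (fun best v => if c v > c best ∨ (c v = c best ∧ f v < f best) then v else best) b' with hr
    -- the element of {b, v} that is not b'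
    rcases hstep with ⟨hb'v, hbt⟩ | ⟨hb'b, hbt⟩
    · -- b' = v, dropped b
      rcases List.mem_cons.mp hw with rfl | hw2
      · -- w = b
        by_cases hrb' : r = b'
        · rw [hrb', hb'v]; exact hbt
        · exact pvBeats_trans (hbeats b' List.mem_cons_self (fun h => hrb' h.symm)) (hb'v ▸ hbt)
      · rcases List.mem_cons.mp hw2 with rfl | hw3
        · exact hbeats w (hb'v ▸ List.mem_cons_self) hne
        · exact hbeats w (List.mem_cons_of_mem _ hw3) hne
    · -- b' = b, dropped v
      rcases List.mem_cons.mp hw with rfl | hw2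
      · exact hbeats w (hb'b ▸ List.mem_cons_self) hne
      · rcases List.mem_cons.mp hw2 with rfl | hw3
        · -- w = v
          by_cases hrb' : r = b'
          · rw [hrb', hb'b]; exact hbt
          · exact pvBeats_trans (hbeats b' List.mem_cons_self (fun h => hrb' h.symm)) (hb'b ▸ hbt)
        · exact hbeats w (List.mem_cons_of_mem _ hw3) hne

lemma pvOptFold (c f : Int → Int) :
    ∀ (V : List Int) (b : Int),
    (V.foldl (fun (best : Option Int) v =>
        match best with
        | none => some v
        | some b => if c v > c b ∨ (c v = c b ∧ f v < f b) then some v else best)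
      (some b))
    = some (V.foldl (fun best v => if c v > c best ∨ (c v = c best ∧ f v < f best) then v else best) b) := by
  intro V
  induction V with
  | nil => intro b; rfl
  | cons v V' ih =>
    intro b
    simp only [List.foldl_cons]
    rw [← apply_ite some]
    exact ih _

lemma pvA_char {d : List (Int × Int)} (hnd : (d.map Prod.fst).Nodup) (hne : d ≠ []) :
    find_default_element_py d ∈ (pvStarts d).map Prod.snd ∧
    ∀ w ∈ (pvStarts d).map Prod.snd, w ≠ find_default_element_py d →
      pvBeats (fun v => (((pvStarts d).map Prod.snd).count v : Int))
              (fun v => (pvMinKey (pvStarts d) v).getD 0)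
              (find_default_element_py d) w := by
  obtain ⟨s0, rest, hS⟩ : ∃ s0 rest, pvS d = s0 :: rest := by
    cases hS : pvS d with
    | nil => exact absurd ((PySem.List.sorted_eq_nil_iff d Prod.fst false).1 hS) hne
    | cons s0 rest => exact ⟨s0, rest, rfl⟩
  set vals := (pvStarts d).map Prod.snd with hvals
  set c : Int → Int := fun v => ((vals.count v : Nat) : Int) with hc
  set f : Int → Int := fun v => (pvMinKey (pvStarts d) v).getD 0 with hf
  have hvalsne : vals ≠ [] := by
    rw [hvals, pvStarts_cons hnd hS]; simp
  set V := PySem.Set.ofList vals with hV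
  have hVne : V ≠ [] := by
    rw [hV, hvals, pvStarts_cons hnd hS]
    simp [PySem.Set.ofList_cons]
  -- unfold the port
  simp only [find_default_element_py]
  rw [pvA_vc hnd hS]
  set C := PySem.Dict.counter vals with hC
  have hitems : C.items = V.map (fun k => (k, (vals.count k : Int))) :=
    PySem.Dict.items_counter vals
  have hvalues : C.values = V.map c := by
    show C.items.map Prod.snd = V.map c
    rw [hitems, List.map_map]
    rfl
  -- the maximum
  obtain ⟨M, hM⟩ : ∃ M, PySem.List.max? C.values (fun c => c) = some M := by
    cases hmax : PySem.List.max? C.values (fun c => c) with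
    | none =>
      rw [PySem.List.max?_eq_none_iff, hvalues] at hmax
      simp at hmax
      exact absurd (by simp [hmax]) hVne
    | some M => exact ⟨M, rfl⟩
  rw [hM]
  simp only [Option.getD_some]
  -- rewrite the result list
  rw [hitems, List.filter_map, List.map_map]
  have hproj : (Prod.fst ∘ fun k => (k, (vals.count k : Int))) = id := rfl
  rw [hproj, List.map_id]
  set W := V.filter ((fun p => p.2 == M) ∘ fun k => (k, (vals.count k : Int))) with hW
  have hWmem : ∀ w, w ∈ W ↔ (w ∈ V ∧ c w = M) := by
    intro w
    rw [hW, List.mem_filter]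
    simp [hc]
  -- W is nonempty
  obtain ⟨k0, hk0⟩ : ∃ k0, k0 ∈ V ∧ c k0 = M := by
    have := PySem.List.max?_mem hM
    rw [hvalues] at this
    rcases List.mem_map.1 this with ⟨k0, hk0, hck0⟩
    exact ⟨k0, hk0, hck0⟩
  have hWne : W ≠ [] := by
    intro h
    have := (hWmem k0).2 hk0
    rw [h] at this
    simp at this
  obtain ⟨a, t, hWa⟩ : ∃ a t, W = a :: t := by
    cases hWc : W with
    | nil => exact absurd hWc hWne
    | cons a t => exact ⟨a, t, rfl⟩
  rw [hWa]
  simp only [List.headD_cons]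
  have haW : a ∈ W := by rw [hWa]; exact List.mem_cons_self
  have haV : a ∈ V := ((hWmem a).1 haW).1
  have hca : c a = M := ((hWmem a).1 haW).2
  constructor
  · rw [← PySem.Set.mem_ofList vals a]; exact haV
  · intro w hw hne'
    have hwV : w ∈ V := (PySem.Set.mem_ofList vals w).2 hw
    have hwle : c w ≤ M := by
      have := PySem.List.max?_isMax hM (c w) (by rw [hvalues]; exact List.mem_map_of_mem hwV)
      simpa using this
    by_cases hcw : c w = M
    · -- tie: compare first keys via the pairwise order on V
      have hwW : w ∈ W := (hWmem w).2 ⟨hwV, hcw⟩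
      have hpwV : V.Pairwise (fun a b => f a < f b) := by
        rw [hV, hvals]
        exact pvPairwise_fm (pvStarts d)
          (List.Pairwise.sublist (List.filter_sublist) (pvS_pairwise hnd))
      have hpwW : W.Pairwise (fun a b => f a < f b) :=
        List.Pairwise.sublist List.filter_sublist hpwV
      rw [hWa] at hwW
      rcases List.mem_cons.mp hwW with rfl | hwt
      · exact absurd rfl hne'
      · have := (List.pairwise_cons.1 (hWa ▸ hpwW)).1 w hwt
        exact Or.inr ⟨by omega, this⟩
    · exact Or.inl (by omega)


lemma pvB_fold (d : List (Int × Int)) :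
    (d.foldl
      (fun (st : PySem.Dict Int Int × PySem.Dict Int Int) kv =>
        if (PySem.Dict.mk d).get? (kv.1 - 1) ≠ some kv.2 then
          (st.1.insert kv.2 (st.1.getD kv.2 0 + 1),
           if st.2.contains kv.2 = false ∨ kv.1 < st.2.getD kv.2 0 then st.2.insert kv.2 kv.1 else st.2)
        else st)
      (PySem.Dict.empty, PySem.Dict.empty))
    = (PySem.Dict.counter ((pvStartsB d).map Prod.snd),
       (pvStartsB d).foldl (fun fs kv =>
          if fs.contains kv.2 = false ∨ kv.1 < fs.getD kv.2 0 then fs.insert kv.2 kv.1 else fs)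
        PySem.Dict.empty) := by
  rw [PySem.List.foldl_ite_eq_foldl_filter
    (p := fun kv : Int × Int => (PySem.Dict.mk d).get? (kv.1 - 1) ≠ some kv.2)
    (f := fun (st : PySem.Dict Int Int × PySem.Dict Int Int) kv =>
      (st.1.insert kv.2 (st.1.getD kv.2 0 + 1),
       if st.2.contains kv.2 = false ∨ kv.1 < st.2.getD kv.2 0 then st.2.insert kv.2 kv.1 else st.2))]
  have hfilter : d.filter (fun kv => decide ((PySem.Dict.mk d).get? (kv.1 - 1) ≠ some kv.2)) = pvStartsB d := rfl
  rw [hfilter]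
  rw [PySem.List.foldl_prod_mk
    (f := fun (c : PySem.Dict Int Int) (kv : Int × Int) => c.insert kv.2 (c.getD kv.2 0 + 1))
    (g := fun (fs : PySem.Dict Int Int) (kv : Int × Int) =>
      if fs.contains kv.2 = false ∨ kv.1 < fs.getD kv.2 0 then fs.insert kv.2 kv.1 else fs)]
  congr 1
  rw [← PySem.Dict.foldl_insert_getD_add_one_eq_counter, List.foldl_map]

lemma pvB_char {d : List (Int × Int)} (hnd : (d.map Prod.fst).Nodup) (hne : d ≠ []) :
    find_default_element_py_alt d ∈ (pvStartsB d).map Prod.snd ∧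
    ∀ w ∈ (pvStartsB d).map Prod.snd, w ≠ find_default_element_py_alt d →
      pvBeats (fun v => (((pvStartsB d).map Prod.snd).count v : Int))
              (fun v => (pvMinKey (pvStartsB d) v).getD 0)
              (find_default_element_py_alt d) w := by
  set valsB := (pvStartsB d).map Prod.snd with hvalsB
  set c : Int → Int := fun v => ((valsB.count v : Nat) : Int) with hc
  set f : Int → Int := fun v => (pvMinKey (pvStartsB d) v).getD 0 with hf
  -- nonemptiness: the minimal key of d is a run start
  have hvalsne : valsB ≠ [] := by
    obtain ⟨s0, rest, hS⟩ : ∃ s0 rest, pvS d = s0 :: rest := by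
      cases hS : pvS d with
      | nil => exact absurd ((PySem.List.sorted_eq_nil_iff d Prod.fst false).1 hS) hne
      | cons s0 rest => exact ⟨s0, rest, rfl⟩
    have h1 : ((pvStarts d).map Prod.snd) ≠ [] := by
      rw [pvStarts_cons hnd hS]; simp
    intro h
    apply h1
    have : ((pvStarts d).map Prod.snd).Perm valsB := pvStarts_perm.map Prod.snd
    rw [h] at this
    exact List.Perm.eq_nil this
  simp only [find_default_element_py_alt]
  rw [pvB_fold d]
  -- the first dict's lookups
  have hfirst : ∀ v, ((pvStartsB d).foldl (fun fs kv =>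
      if fs.contains kv.2 = false ∨ kv.1 < fs.getD kv.2 0 then fs.insert kv.2 kv.1 else fs)
      PySem.Dict.empty).getD v 0 = f v := by
    intro v
    rw [PySem.Dict.getD_eq_get?_getD, pvFirstFold_get?]
    rw [show (PySem.Dict.empty : PySem.Dict Int Int).get? v = none from rfl]
    rfl
  have hcount : ∀ v, (PySem.Dict.counter valsB).getD v 0 = c v := fun v =>
    PySem.Dict.getD_counter valsB v
  -- rewrite the selection fold's body
  have hbody : (fun (best : Option Int) (p : Int × Int) =>
      match best with
      | none => some p.1
      | some b =>
          if p.2 > (PySem.Dict.counter valsB).getD b 0 ∨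
             (p.2 = (PySem.Dict.counter valsB).getD b 0 ∧
              ((pvStartsB d).foldl (fun fs kv =>
                if fs.contains kv.2 = false ∨ kv.1 < fs.getD kv.2 0 then fs.insert kv.2 kv.1 else fs)
                PySem.Dict.empty).getD p.1 0 <
              ((pvStartsB d).foldl (fun fs kv =>
                if fs.contains kv.2 = false ∨ kv.1 < fs.getD kv.2 0 then fs.insert kv.2 kv.1 else fs)
                PySem.Dict.empty).getD b 0)
          then some p.1 else best)
    = (fun (best : Option Int) (p : Int × Int) =>
      match best with
      | none => some p.1
      | some b => if p.2 > c b ∨ (p.2 = c b ∧ f p.1 < f b) then some p.1 else best) := by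
    funext best p
    cases best with
    | none => rfl
    | some b => simp only [hcount, hfirst]
  rw [hbody]
  -- items of the counter, fold over the value set
  rw [PySem.Dict.items_counter valsB]
  obtain ⟨v0, Vt, hVc⟩ : ∃ v0 Vt, PySem.Set.ofList valsB = v0 :: Vt := by
    cases hVc : PySem.Set.ofList valsB with
    | nil =>
      cases hv : valsB with
      | nil => exact absurd hv hvalsne
      | cons x xs => rw [hv, PySem.Set.ofList_cons] at hVc; simp at hVc
    | cons v0 Vt => exact ⟨v0, Vt, rfl⟩
  rw [List.foldl_map, hVc]
  simp only [List.foldl_cons]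
  rw [pvOptFold c f Vt v0]
  simp only [Option.getD_some]
  -- the selection invariant
  have hfinj : ∀ x ∈ v0 :: Vt, ∀ y ∈ v0 :: Vt, x ≠ y → f x ≠ f y := by
    intro x hx y hy hxy
    have hxV : x ∈ valsB := (PySem.Set.mem_ofList _ _).1 (by rw [hVc]; exact hx)
    have hyV : y ∈ valsB := (PySem.Set.mem_ofList _ _).1 (by rw [hVc]; exact hy)
    rcases List.mem_map.1 hxV with ⟨px, hpx, hpx2⟩
    rcases List.mem_map.1 hyV with ⟨py, hpy, hpy2⟩
    obtain ⟨mx, hmx⟩ := pvMinKey_isSome (l := pvStartsB d) (v := x) ⟨px, hpx, hpx2⟩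
    obtain ⟨my, hmy⟩ := pvMinKey_isSome (l := pvStartsB d) (v := y) ⟨py, hpy, hpy2⟩
    have hmxd : (mx, x) ∈ d := List.mem_of_mem_filter (pvMinKey_mem hmx)
    have hmyd : (my, y) ∈ d := List.mem_of_mem_filter (pvMinKey_mem hmy)
    rw [hf]
    simp only [hmx, hmy, Option.getD_some]
    intro h
    subst h
    exact hxy (congrArg Prod.snd (pvKeyInj hnd hmxd hmyd rfl))
  have hndV : (v0 :: Vt).Nodup := by rw [← hVc]; exact PySem.Set.nodup_ofList valsB
  obtain ⟨hmem, hbeats⟩ := pvSelFoldPure c f Vt v0 hndV hfinj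
  constructor
  · exact (PySem.Set.mem_ofList _ _).1 (by rw [hVc]; exact hmem)
  · intro w hw hne'
    exact hbeats w (by rw [← hVc]; exact (PySem.Set.mem_ofList valsB w).2 hw) hne'

theorem pv_main {d : List (Int × Int)} (hne : d ≠ []) (hnd : (d.map Prod.fst).Nodup) :
    find_default_element_py d = find_default_element_py_alt d := by
  have hpermS : (pvStarts d).Perm (pvStartsB d) := pvStarts_perm
  have hperm : ((pvStarts d).map Prod.snd).Perm ((pvStartsB d).map Prod.snd) :=
    hpermS.map Prod.snd
  have hcEq : (fun v => ((((pvStarts d).map Prod.snd).count v : Nat) : Int))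
      = (fun v => ((((pvStartsB d).map Prod.snd).count v : Nat) : Int)) := by
    funext v
    rw [hperm.count_eq]
  have hfEq : (fun v => (pvMinKey (pvStarts d) v).getD 0)
      = (fun v => (pvMinKey (pvStartsB d) v).getD 0) := by
    funext v
    rw [pvMinKey_perm hpermS]
  obtain ⟨haMem, haBeats⟩ := pvA_char hnd hne
  obtain ⟨hbMem, hbBeats⟩ := pvB_char hnd hne
  by_contra hab
  have h1 : pvBeats (fun v => ((((pvStartsB d).map Prod.snd).count v : Nat) : Int))
      (fun v => (pvMinKey (pvStartsB d) v).getD 0)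
      (find_default_element_py d) (find_default_element_py_alt d) := by
    rw [← hcEq, ← hfEq]
    exact haBeats _ (hperm.mem_iff.2 hbMem) (fun h => hab h.symm)
  have h2 := hbBeats _ (hperm.mem_iff.1 haMem) (fun h => hab h)
  unfold pvBeats at h1 h2
  rcases h1 with h1 | ⟨h1, h1f⟩ <;> rcases h2 with h2 | ⟨h2, h2f⟩ <;> omega

-- ===== VERDICT (by name: the statement is the Claim_ definition above) =====
theorem find_default_element_py_spec : Claim_equal_find_default_element_py := by
  intro d _ hpre
  unfold Spec_find_default_element_py
  exact pv_main hpre.1 hpre.2
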